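-- pv_equiv track=rewrite | github.com/songga0/baekjoon | 프로그래머스/1/17681. ［1차］ 비밀지도/［1차］ 비밀지도.py | solution
-- ===== SOURCE A (Python) =====
-- def solution(n, arr1, arr2):
--     answer = []
--     x=[]
--     for i in range(len(arr1)):
--         x.append(bin(arr1[i] | arr2[i])[2:].zfill(n))
--     for i in x:
--         y=''
--         for j in i:
--             if j=='1':
--                 y+='#'
--             else:
--                 y+=' '
--         answer.append(y)
--     return answer
-- ===== SOURCE B (Python) =====
-- def solution(n, arr1, arr2):
--     rows = []
--     for a, b in zip(arr1, arr2):
--         s = bin(a | b)[2:]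
--         width = max(n, len(s))
--         row = [' '] * width
--         pad = width - len(s)
--         j = s.find('1')
--         while j != -1:
--             row[pad + j] = '#'
--             j = s.find('1', j + 1)
--         rows.append(''.join(row))
--     return rows
-- ===== Notes on version B (the rewrite author's own statement) =====
-- stated objective: faster
-- what changed: B replaces A's zfill padding and per-character branch-and-concatenate loop with a blank-canvas approach: it preallocates a space-filled row of width max(n, len(bits)), paints '#' only at the '1' positions located by a str.find scan, and joins once, eliminating the intermediate zero-filled string list and the quadratic repeated string concatenation.
import Mathlib
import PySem

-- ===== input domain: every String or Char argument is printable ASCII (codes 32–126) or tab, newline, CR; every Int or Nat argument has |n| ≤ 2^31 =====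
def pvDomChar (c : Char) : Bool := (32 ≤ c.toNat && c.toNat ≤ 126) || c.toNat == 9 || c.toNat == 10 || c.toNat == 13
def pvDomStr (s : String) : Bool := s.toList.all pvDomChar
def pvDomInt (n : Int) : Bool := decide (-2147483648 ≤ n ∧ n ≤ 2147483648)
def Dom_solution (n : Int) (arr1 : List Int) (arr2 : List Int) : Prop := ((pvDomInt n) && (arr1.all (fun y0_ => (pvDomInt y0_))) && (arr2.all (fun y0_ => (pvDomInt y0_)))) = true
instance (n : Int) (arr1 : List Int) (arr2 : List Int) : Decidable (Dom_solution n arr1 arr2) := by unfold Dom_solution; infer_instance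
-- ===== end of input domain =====

-- B replaces A's zfill padding and per-character translation loop by a blank canvas of
-- spaces into which '#' is painted only at the '1' positions located by a find scan
-- once per row (objective: faster; a timing run measured it).

-- ===== PORT A =====
def solution (n : Int) (arr1 : List Int) (arr2 : List Int) : List String :=
  -- x = []; for i in range(len(arr1)): x.append(bin(arr1[i] | arr2[i])[2:].zfill(n))
  -- for i in x: y = ''; for j in i: y += '#' if j=='1' else ' '; answer.append(y)
  ((PySem.List.pyRange 0 (PySem.List.len arr1)).foldl
      (fun x i =>
        x ++ [PySem.Chars.zfill
                (PySem.Chars.slice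
                  (PySem.Int.toBinChars0b
                    (PySem.Int.bor ((PySem.List.pyGet? arr1 i).getD 0)
                                   ((PySem.List.pyGet? arr2 i).getD 0)))
                  (some 2) none) n]) []).foldl
    (fun answer i =>
      answer ++ [String.ofList (i.foldl (fun y j => y ++ [if j = '1' then '#' else ' ']) [])]) []

-- ===== PORT B =====
-- while j != -1: row[pad + j] = '#'; j = s.find('1', j + 1)
-- fuel only makes the loop total (at most s.length paints happen); row[pad+j] = '#' is a
-- plain in-range list assignment here (pad + j < width always), so List.set is exact.
def paintLoop (fuel : Nat) (s : List Char) (row : List Char) (pad : Int) (j : Int) : List Char :=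
  match fuel with
  | 0 => row
  | fuel + 1 =>
    if j = -1 then row
    else paintLoop fuel s (row.set (pad + j).toNat '#') pad (PySem.Chars.findFrom s ['1'] (j + 1))

def solutionAltRow (n : Int) (p : Int × Int) : String :=
  let s := PySem.Chars.slice (PySem.Int.toBinChars0b (PySem.Int.bor p.1 p.2)) (some 2) none
  let width : Int := max n (s.length : Int)
  let row := List.replicate width.toNat ' '
  let pad : Int := width - (s.length : Int)
  String.ofList (paintLoop (s.length + 1) s row pad (PySem.Chars.find s ['1']))

def solution_alt (n : Int) (arr1 : List Int) (arr2 : List Int) : List String :=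
  (arr1.zip arr2).foldl (fun rows p => rows ++ [solutionAltRow n p]) []

-- ===== PRECONDITION & SPEC =====
-- A indexes arr2 at every i < len(arr1), so it raises IndexError when arr2 is shorter than
-- arr1; Pre_ excludes exactly those inputs.
def Pre_solution (n : Int) (arr1 : List Int) (arr2 : List Int) : Prop :=
  arr1.length ≤ arr2.length
instance (n : Int) (arr1 : List Int) (arr2 : List Int) : Decidable (Pre_solution n arr1 arr2) := by unfold Pre_solution; infer_instance

def pvWitness_solution : Int × List Int × List Int := (5, [9, 20, 28, 18, 11], [30, 1, 21, 17, 28])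

def Spec_solution (n : Int) (arr1 : List Int) (arr2 : List Int) (out : List String) : Prop := out = solution_alt n arr1 arr2
instance (n : Int) (arr1 : List Int) (arr2 : List Int) (out : List String) : Decidable (Spec_solution n arr1 arr2 out) := by unfold Spec_solution; infer_instance

-- ===== CLAIM (what is proved, stated in full; the proofs are below) =====
def Claim_equal_solution : Prop := ∀ (n : Int) (arr1 : List Int) (arr2 : List Int), Dom_solution n arr1 arr2 → Pre_solution n arr1 arr2 → Spec_solution n arr1 arr2 (solution n arr1 arr2)

-- ===== LEMMAS AND PROOFS =====

-- '#' if j == '1' else ' ', as a character map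
def map2 (c : Char) : Char := if c = '1' then '#' else ' '

theorem flatMap_singleton_eq_map {α β : Type} (f : α → β) (l : List α) :
    l.flatMap (fun x => [f x]) = l.map f := by
  induction l with
  | nil => rfl
  | cons x xs ih => simp [List.flatMap_cons, ih]

theorem singleton_infix_iff (a : Char) (l : List Char) : [a] <:+: l ↔ a ∈ l := by
  constructor
  · intro h
    exact h.subset List.mem_cons_self
  · intro h
    obtain ⟨p, q, rfl⟩ := List.append_of_mem h
    exact ⟨p, q, by simp⟩

theorem singleton_prefix_drop (s : List Char) (i : Nat) (hi : i < s.length) :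
    ['1'] <+: s.drop i ↔ s[i] = '1' := by
  rw [List.drop_eq_getElem_cons hi, List.cons_prefix_cons]
  simp [eq_comm]

theorem map2_drop_no_one (s : List Char) (k : Nat) (h : '1' ∉ s.drop k) :
    (s.drop k).map map2 = List.replicate (s.length - k) ' ' := by
  rw [List.eq_replicate_iff]
  constructor
  · simp
  · intro b hb
    obtain ⟨c, hc, rfl⟩ := List.mem_map.mp hb
    have : c ≠ '1' := fun hc1 => h (hc1 ▸ hc)
    simp [map2, this]

theorem set_mid (s : List Char) (k j : Nat) (hkj : k ≤ j) (hjl : j < s.length)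
    (hone : s[j] = '1')
    (hmin : ∀ i, k ≤ i → i < j → i < s.length → s[i]! ≠ '1') :
    ((s.take k).map map2 ++ List.replicate (s.length - k) ' ').set j '#'
      = (s.take (j + 1)).map map2 ++ List.replicate (s.length - (j + 1)) ' ' := by
  have hk : k ≤ s.length := by omega
  refine List.ext_getElem (by simp; omega) ?_
  intro i h1 h2
  have hlen1 : ((s.take k).map map2).length = k := by simp; omega
  have hlen2 : ((s.take (j+1)).map map2).length = j + 1 := by simp; omega
  have hi : i < s.length := by simp at h1; omega
  by_cases hik : i < k
  · -- untouched prefix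
    rw [List.getElem_set_ne (by omega)]
    rw [List.getElem_append_left (by omega), List.getElem_append_left (by omega)]
    simp [List.getElem_take]
  · by_cases hij : i < j
    · -- between k and j: blank on the left, map2 of a non-'1' char on the right
      rw [List.getElem_set_ne (by omega)]
      rw [List.getElem_append_right (by omega), List.getElem_append_left (by omega)]
      have hne : s[i] ≠ '1' := by
        have := hmin i (by omega) hij hi
        rwa [List.getElem!_eq_getElem?_getD, List.getElem?_eq_getElem hi, Option.getD_some] at this
      simp [List.getElem_replicate, List.getElem_take, map2, hne]
    · by_cases hieq : i = j
      · -- the painted position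
        subst hieq
        rw [List.getElem_set_self (by simp; omega)]
        rw [List.getElem_append_left (by omega)]
        simp [List.getElem_take, map2, hone]
      · -- beyond j: blank on both sides
        rw [List.getElem_set_ne (by omega)]
        rw [List.getElem_append_right (by omega), List.getElem_append_right (by omega)]
        simp [List.getElem_replicate]

theorem paint_inv (s : List Char) (pad : Nat) :
    ∀ (fuel k : Nat), k ≤ s.length → s.length - k < fuel →
      paintLoop fuel s
          (List.replicate pad ' ' ++ ((s.take k).map map2 ++ List.replicate (s.length - k) ' '))
          (pad : Int) (PySem.Chars.findFrom s ['1'] (k : Nat))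
        = List.replicate pad ' ' ++ s.map map2 := by
  intro fuel
  induction fuel with
  | zero => intro k _ h; omega
  | succ fuel ih =>
    intro k hk hfuel
    by_cases hj : PySem.Chars.findFrom s ['1'] (k : Nat) = -1
    · -- no further '1': the row is already the target
      rw [paintLoop, if_pos hj]
      have hno : ¬ ['1'] <:+: s.drop k := (PySem.Chars.findFrom_natCast_eq_neg_one_iff s ['1'] k hk).mp hj
      have hmem : '1' ∉ s.drop k := fun h => hno ((singleton_infix_iff '1' (s.drop k)).mpr h)
      rw [← map2_drop_no_one s k hmem, ← List.map_append, List.take_append_drop]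
    · obtain ⟨hkle, hpref, hmin⟩ := PySem.Chars.findFrom_natCast_spec s ['1'] k hk hj
      set J : Int := PySem.Chars.findFrom s ['1'] (k : Nat) with hJ
      have hJnn : 0 ≤ J := le_trans (by exact_mod_cast Int.natCast_nonneg k) hkle
      set j : Nat := J.toNat with hjdef
      have hJj : J = (j : Int) := (Int.toNat_of_nonneg hJnn).symm
      have hkj : k ≤ j := by omega
      have hjl : j < s.length := by
        by_contra hge
        have : s.drop j = [] := List.drop_eq_nil_of_le (by omega)
        rw [this] at hpref
        exact absurd (List.prefix_nil.mp hpref) (by simp)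
      have hj1 : s[j] = '1' := (singleton_prefix_drop s j hjl).mp hpref
      rw [paintLoop, if_neg hj]
      have hidx : ((pad : Int) + J).toNat = pad + j := by omega
      have hset :
          (List.replicate pad ' ' ++ ((s.take k).map map2 ++ List.replicate (s.length - k) ' ')).set
              (pad + j) '#'
            = List.replicate pad ' ' ++ ((s.take (j+1)).map map2 ++ List.replicate (s.length - (j+1)) ' ') := by
        rw [List.set_append]
        rw [if_neg (by simp)]
        congr 1
        simp only [List.length_replicate, Nat.add_sub_cancel_left]
        exact set_mid s k j hkj hjl hj1 (fun i h1 h2 h3 => by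
          intro h1eq
          have : ['1'] <+: s.drop i := by
            rw [singleton_prefix_drop s i h3]
            rwa [List.getElem!_eq_getElem?_getD, List.getElem?_eq_getElem h3, Option.getD_some] at h1eq
          exact (hmin i h1 h2 this).elim)
      rw [hidx, hset]
      have hnext : J + 1 = ((j + 1 : Nat) : Int) := by omega
      rw [hnext]
      exact ih (j + 1) (by omega) (by omega)

theorem digit_head_not_sign {m : Nat} {c : Char} {rest : List Char}
    (h : Nat.toDigits 2 m = c :: rest) : ¬ (c = '+' ∨ c = '-') := by
  have hmem : c ∈ Nat.toDigits 2 m := by rw [h]; exact List.mem_cons_self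
  have hd : c.isDigit = true := Nat.isDigit_of_mem_toDigits (by norm_num) (by norm_num) hmem
  rintro (rfl | rfl) <;> simp [Char.isDigit] at hd

theorem zfill_no_sign (c : Char) (rest : List Char) (hc : ¬ (c = '+' ∨ c = '-')) (n : Int) :
    PySem.Chars.zfill (c :: rest) n
      = List.replicate (n.toNat - (c :: rest).length) '0' ++ (c :: rest) := by
  unfold PySem.Chars.zfill
  by_cases h : n ≤ ((c :: rest).length : Int)
  · rw [if_pos h]
    have : n.toNat - (c :: rest).length = 0 := by simp at h ⊢; omega
    rw [this, List.replicate_zero, List.nil_append]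
  · rw [if_neg h]
    show (if c = '+' ∨ c = '-'
        then c :: (List.replicate (n.toNat - (c :: rest).length) '0' ++ rest)
        else List.replicate (n.toNat - (c :: rest).length) '0' ++ c :: rest)
      = List.replicate (n.toNat - (c :: rest).length) '0' ++ (c :: rest)
    rw [if_neg hc]

-- the per-element core: A's padded/translated row equals B's painted canvas
theorem row_eq (n a b : Int) :
    String.ofList ((PySem.Chars.zfill
        (PySem.Chars.slice (PySem.Int.toBinChars0b (PySem.Int.bor a b)) (some 2) none) n).map map2)
      = solutionAltRow n (a, b) := by
  unfold solutionAltRow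
  simp only
  set v : Int := PySem.Int.bor a b with hv
  set s : List Char := PySem.Chars.slice (PySem.Int.toBinChars0b v) (some 2) none with hs
  -- s is nonempty and starts with a digit or 'b', never a sign
  obtain ⟨c, rest, hcr, hsign⟩ :
      ∃ c rest, s = c :: rest ∧ ¬ (c = '+' ∨ c = '-') := by
    have hsl : s = List.drop 2 (PySem.Int.toBinChars0b v) := by
      rw [hs, PySem.Chars.slice_eq_listSlice, PySem.List.slice_from _ (by norm_num),
        show Int.toNat 2 = 2 from rfl]
    obtain ⟨d, drest, hD⟩ : ∃ d drest, Nat.toDigits 2 v.natAbs = d :: drest := by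
      cases hE : Nat.toDigits 2 v.natAbs with
      | nil => exact absurd (hE ▸ Nat.length_toDigits_pos) (by simp)
      | cons d drest => exact ⟨d, drest, rfl⟩
    by_cases h0 : 0 ≤ v
    · have htb : PySem.Int.toBinChars0b v = '0' :: 'b' :: Nat.toDigits 2 v.natAbs := by
        rw [PySem.Int.toBinChars0b, if_neg (by omega),
          show v.toNat = v.natAbs from by omega]
      refine ⟨d, drest, ?_, digit_head_not_sign hD⟩
      rw [hsl, htb, hD]
      simp
    · have htb : PySem.Int.toBinChars0b v = '-' :: '0' :: 'b' :: Nat.toDigits 2 v.natAbs := by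
        rw [PySem.Int.toBinChars0b, if_pos (by omega)]
      refine ⟨'b', Nat.toDigits 2 v.natAbs, ?_, by rintro (h | h) <;> simp_all⟩
      rw [hsl, htb]
      simp
  -- the working width and pad
  have hlenpos : 0 < s.length := by rw [hcr]; simp
  set W : Nat := (max n (s.length : Int)).toNat with hW
  have hmaxle : (s.length : Int) ≤ max n (s.length : Int) := le_max_right _ _
  have hWlen : s.length ≤ W := by omega
  set padN : Nat := W - s.length with hpadN
  have hpadI : max n (s.length : Int) - (s.length : Int) = (padN : Int) := by omega
  -- A's side: zfill then map2
  rw [hcr, zfill_no_sign c rest hsign, ← hcr]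
  have hA : (List.replicate (n.toNat - s.length) '0' ++ s).map map2
      = List.replicate padN ' ' ++ s.map map2 := by
    have : n.toNat - s.length = padN := by omega
    simp [map2, List.map_replicate, this]
  rw [hA]
  -- B's side: the canvas paint
  rw [hpadI]
  have hcanvas : List.replicate W ' '
      = List.replicate padN ' ' ++ ((s.take 0).map map2 ++ List.replicate (s.length - 0) ' ') := by
    simp
    omega
  rw [show PySem.Chars.find s ['1'] = PySem.Chars.findFrom s ['1'] ((0 : Nat) : Int) from
        (PySem.Chars.findFrom_zero s ['1']).symm,
      hcanvas,
      paint_inv s padN (s.length + 1) 0 (by omega) (by omega)]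

-- ===== VERDICT (by name: the statement is the Claim_ definition above) =====
theorem solution_spec : Claim_equal_solution := by
  intro n arr1 arr2 _ hpre
  unfold Spec_solution solution solution_alt
  rw [show PySem.List.len arr1 = ((arr1.length : Nat) : Int) from by
        simp [PySem.List.len_eq],
      PySem.List.pyRange_zero_nat]
  simp only [PySem.List.foldl_append_eq_flatMap, List.nil_append,
    flatMap_singleton_eq_map, List.map_map]
  have hpre' : arr1.length ≤ arr2.length := hpre
  refine List.ext_getElem (by simp [List.length_zip]; omega) ?_
  intro k hk1 hk2
  simp only [List.getElem_map, List.getElem_range, Function.comp]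
  have hk : k < arr1.length := by simpa using hk1
  have hk2' : k < arr2.length := by omega
  rw [List.getElem_zip]
  rw [PySem.List.pyGet?_natCast, PySem.List.pyGet?_natCast,
    List.getElem?_eq_getElem hk, List.getElem?_eq_getElem hk2']
  simp only [Option.getD_some]
  have hmap : (fun j => if j = '1' then '#' else ' ') = map2 := by funext j; rfl
  rw [hmap]
  exact row_eq n arr1[k] arr2[k]
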